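-- pv_equiv track=rewrite | github.com/benmo-cyber/SLURP-ERP | backend_django/erp_core/packing_list_pdf_html.py | _split_address_line_for_display
-- ===== SOURCE A (Python) =====
-- def _split_address_line_for_display(s):
--     """
--     Turn one stored string into one or more display lines.
--     Splits on newlines; for long comma-separated text, splits on commas only when there are 3+ commas
--     (so "City, ST, ZIP" stays on one line under Ship To / Bill To).
--     """
--     s = (s or "").strip()
--     if not s:
--         return []
--     if "\n" in s:
--         parts = []
--         for line in s.split("\n"):
--             parts.extend(_split_address_line_for_display(line))
--         return parts
--     # Keep "City, ST, ZIP" on one line (2 commas). Only split very long / many-part lines.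
--     if "," in s and (len(s) > 40 or s.count(",") >= 3):
--         return [p.strip() for p in s.split(",") if p.strip()]
--     return [s]
-- ===== SOURCE B (Python) =====
-- def _split_address_line_for_display(s):
--     """Iterative rewrite: one flat loop over newline pieces, no recursion and no
--     special empty-input case (an empty/blank input yields only blank pieces, which
--     the loop skips)."""
--     text = (s or "").strip()
--     pieces = []
--     for raw in text.split("\n"):
--         line = raw.strip()
--         if not line:
--             continue
--         if "," in line and (len(line) > 40 or line.count(",") >= 3):
--             pieces.extend(p.strip() for p in line.split(",") if p.strip())
--         else:
--             pieces.append(line)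
--     return pieces
-- ===== Notes on version B (the rewrite author's own statement) =====
-- stated objective: simpler
-- what changed: Replaced A's self-recursion (recursing on each newline piece, with a separate empty-input early return) by a single flat loop over the newline pieces that strips, skips blanks, and comma-splits each piece in place; no recursion and no empty-input special case.
import Mathlib
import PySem

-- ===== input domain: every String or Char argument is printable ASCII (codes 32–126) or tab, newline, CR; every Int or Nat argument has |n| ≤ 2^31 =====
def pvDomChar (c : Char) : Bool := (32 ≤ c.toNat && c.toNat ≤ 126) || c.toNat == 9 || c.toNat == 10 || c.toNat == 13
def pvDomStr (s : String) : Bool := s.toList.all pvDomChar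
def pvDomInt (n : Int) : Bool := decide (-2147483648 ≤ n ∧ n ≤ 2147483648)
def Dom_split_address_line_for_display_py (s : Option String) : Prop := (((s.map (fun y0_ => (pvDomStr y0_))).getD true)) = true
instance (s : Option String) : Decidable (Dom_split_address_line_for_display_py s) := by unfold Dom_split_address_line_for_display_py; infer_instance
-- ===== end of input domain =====

-- ===== PORT A =====
-- B replaces A's one-level self-recursion and empty-input early return by a single
-- flat loop over the newline pieces (objective: simpler); return values agree on all inputs.
-- A's recursion, transliterated with a fuel counter for totality; fuel 2 always suffices
-- because newline-split pieces contain no '\n', so the recursion is one level deep.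
def split_address_line_for_display_go (fuel : Nat) (s : Option String) : List String :=
  match fuel with
  | 0 => []
  | fuel + 1 =>
    let t := PySem.Str.strip (s.getD "")
    if t = "" then []
    else if PySem.Str.isIn "\n" t then
      ((PySem.Str.split? t "\n").getD []).foldl
        (fun parts line => parts ++ split_address_line_for_display_go fuel (some line)) []
    else if PySem.Str.isIn "," t
        && (decide ((40 : Int) < PySem.Str.len t) || decide (3 ≤ PySem.Str.count t ",")) then
      (((PySem.Str.split? t ",").getD []).map PySem.Str.strip).filter (fun p => p != "")
    else [t]

def split_address_line_for_display_py (s : Option String) : List String :=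
  split_address_line_for_display_go 2 s

-- ===== PORT B =====
def split_address_line_for_display_py_alt (s : Option String) : List String :=
  let text := PySem.Str.strip (s.getD "")
  ((PySem.Str.split? text "\n").getD []).foldl
    (fun pieces raw =>
      let line := PySem.Str.strip raw
      if line = "" then pieces
      else if PySem.Str.isIn "," line
          && (decide ((40 : Int) < PySem.Str.len line) || decide (3 ≤ PySem.Str.count line ",")) then
        pieces ++ (((PySem.Str.split? line ",").getD []).map PySem.Str.strip).filter (fun p => p != "")
      else pieces ++ [line]) []

-- ===== PRECONDITION & SPEC =====
def Spec_split_address_line_for_display_py (s : Option String) (out : List String) : Prop := out = split_address_line_for_display_py_alt s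
instance (s : Option String) (out : List String) : Decidable (Spec_split_address_line_for_display_py s out) := by unfold Spec_split_address_line_for_display_py; infer_instance

-- ===== CLAIM (what is proved, stated in full; the proofs are below) =====
def Claim_equal_split_address_line_for_display_py : Prop := ∀ (s : Option String), Dom_split_address_line_for_display_py s → Spec_split_address_line_for_display_py s (split_address_line_for_display_py s)

-- ===== LEMMAS AND PROOFS =====

-- Character-level splitter: the pieces of l split on the single character c.
def pvSplitCh (c : Char) : List Char → List (List Char)
  | [] => [[]]
  | x :: xs =>
    match pvSplitCh c xs with
    | [] => [[x]]
    | p :: ps => if x = c then [] :: p :: ps else (x :: p) :: ps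

theorem pvSplitCh_ne_nil (c : Char) (l : List Char) : pvSplitCh c l ≠ [] := by
  cases l with
  | nil => simp [pvSplitCh]
  | cons x xs =>
    simp only [pvSplitCh]
    rcases h : pvSplitCh c xs with _ | ⟨p, ps⟩ <;> simp
    split <;> simp

theorem pvSplitOn_go_char (c : Char) : ∀ (l : List Char) (fuel : Nat), l.length ≤ fuel →
    ∀ (cur : List Char) (acc : List (List Char)),
    PySem.Chars.splitOn.go [c] fuel l cur acc
      = acc.reverse ++ (match pvSplitCh c l with
          | [] => []
          | p :: ps => (cur.reverse ++ p) :: ps) := by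
  intro l
  induction l with
  | nil =>
    intro fuel _ cur acc
    cases fuel <;> simp [PySem.Chars.splitOn.go, pvSplitCh]
  | cons x xs ih =>
    intro fuel hf cur acc
    cases fuel with
    | zero => simp at hf
    | succ f =>
      rw [PySem.Chars.splitOn.go]
      simp only [List.isPrefixOf, List.length_cons] at *
      by_cases hxc : x = c
      · subst hxc
        rw [if_pos (by simp)]
        simp only [List.length_nil, Nat.zero_add, List.drop_succ_cons,
          List.drop_zero]
        rw [ih f (by omega) [] (cur.reverse :: acc)]
        rcases h : pvSplitCh x xs with _ | ⟨p, ps⟩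
        · exact absurd h (pvSplitCh_ne_nil x xs)
        · simp [pvSplitCh, h]
      · rw [if_neg (by simp only [Bool.and_eq_true, beq_iff_eq, and_true]; exact fun hc => hxc hc.symm)]
        rw [ih f (by omega) (x :: cur) acc]
        rcases h : pvSplitCh c xs with _ | ⟨p, ps⟩
        · exact absurd h (pvSplitCh_ne_nil c xs)
        · simp [pvSplitCh, h, hxc]

theorem pvSplitOn_char (l : List Char) (c : Char) :
    PySem.Chars.splitOn l [c] = pvSplitCh c l := by
  rw [PySem.Chars.splitOn, pvSplitOn_go_char c l (l.length + 1) (by omega) [] []]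
  rcases h : pvSplitCh c l with _ | ⟨p, ps⟩
  · exact absurd h (pvSplitCh_ne_nil c l)
  · simp

theorem pvSplitCh_of_not_mem {c : Char} {l : List Char} (h : c ∉ l) :
    pvSplitCh c l = [l] := by
  induction l with
  | nil => simp [pvSplitCh]
  | cons x xs ih =>
    simp only [List.mem_cons, not_or] at h
    rw [pvSplitCh, ih h.2]
    simp [Ne.symm h.1]

theorem pvNot_mem_of_mem_splitCh {c : Char} {l : List Char} {p : List Char}
    (hp : p ∈ pvSplitCh c l) : c ∉ p := by
  induction l generalizing p with
  | nil => simp [pvSplitCh] at hp; subst hp; simp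
  | cons x xs ih =>
    rcases h : pvSplitCh c xs with _ | ⟨q, qs⟩
    · exact absurd h (pvSplitCh_ne_nil c xs)
    · have e : pvSplitCh c (x :: xs) = if x = c then [] :: q :: qs else (x :: q) :: qs := by
        rw [pvSplitCh, h]
      rw [e] at hp
      by_cases hxc : x = c
      · rw [if_pos hxc] at hp
        rcases List.mem_cons.mp hp with rfl | hp2
        · simp
        · exact ih (by rw [h]; exact hp2)
      · rw [if_neg hxc] at hp
        rcases List.mem_cons.mp hp with rfl | hp2
        · have hq : c ∉ q := ih (by rw [h]; exact List.mem_cons_self ..)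
          simp only [List.mem_cons, not_or]
          exact ⟨fun hc => hxc hc.symm, hq⟩
        · exact ih (by rw [h]; exact List.mem_cons_of_mem _ hp2)

theorem pvSplit?_nl (t : String) :
    (PySem.Str.split? t "\n").getD [] = (pvSplitCh '\n' t.toList).map String.ofList := by
  have : ("\n" : String).toList = ['\n'] := rfl
  simp [PySem.Str.split?, PySem.Chars.split?, this, pvSplitOn_char]

theorem pvMem_strip {a : Char} {l : List Char} (h : a ∈ PySem.Chars.strip l) : a ∈ l := by
  rw [PySem.Chars.strip, PySem.Chars.rstrip] at h
  rw [List.mem_reverse] at h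
  have h2 := List.Sublist.mem h (List.dropWhile_sublist _)
  rw [List.mem_reverse, PySem.Chars.lstrip] at h2
  exact List.Sublist.mem h2 (List.dropWhile_sublist _)

theorem pvStrip_no_nl {raw : String} (h : '\n' ∉ raw.toList) :
    '\n' ∉ (PySem.Str.strip raw).toList := by
  rw [PySem.Str.toList_strip]
  exact fun hm => h (pvMem_strip hm)

theorem pvIsIn_nl (t : String) : PySem.Str.isIn "\n" t = true ↔ '\n' ∈ t.toList := by
  rw [PySem.Str.isIn_iff_infix]
  have : ("\n" : String).toList = ['\n'] := rfl
  rw [this, List.singleton_infix_iff]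

theorem pvRstrip_idem (l : List Char) :
    PySem.Chars.rstrip (PySem.Chars.rstrip l) = PySem.Chars.rstrip l := by
  simp [PySem.Chars.rstrip, List.dropWhile_idempotent]

theorem pvLstrip_rstrip {l : List Char} (h : PySem.Chars.lstrip l = l) :
    PySem.Chars.lstrip (PySem.Chars.rstrip l) = PySem.Chars.rstrip l := by
  have hpre : PySem.Chars.rstrip l <+: l := by
    rw [PySem.Chars.rstrip]
    rw [← List.reverse_reverse l]
    apply List.reverse_prefix.mpr
    simp [List.dropWhile_suffix]
  cases l with
  | nil => simp [PySem.Chars.rstrip, PySem.Chars.lstrip]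
  | cons x xs =>
    have hx : PySem.Chars.isspace x = false := by
      rw [PySem.Chars.lstrip] at h
      by_contra hc
      have : PySem.Chars.isspace x = true := by revert hc; cases PySem.Chars.isspace x <;> simp
      rw [List.dropWhile_cons_of_pos this] at h
      have := congrArg List.length h
      simp at this
      have := List.length_dropWhile_le (p := PySem.Chars.isspace) (l := xs)
      omega
    rcases hr : PySem.Chars.rstrip (x :: xs) with _ | ⟨y, ys⟩
    · simp [PySem.Chars.lstrip]
    · rw [hr] at hpre
      have hy : y = x := by
        rcases hpre with ⟨tail, htail⟩
        exact (List.cons_eq_cons.mp htail).1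
      rw [PySem.Chars.lstrip, hy, List.dropWhile_cons_of_neg (by simp [hx])]

theorem pvStrip_idem (r : String) :
    PySem.Str.strip (PySem.Str.strip r) = PySem.Str.strip r := by
  apply String.toList_injective
  rw [PySem.Str.toList_strip, PySem.Str.toList_strip]
  rw [PySem.Chars.strip, PySem.Chars.strip]
  rw [pvLstrip_rstrip (by simp [PySem.Chars.lstrip, List.dropWhile_idempotent]), pvRstrip_idem]

-- B's per-line contribution.
def pvEmit (raw : String) : List String :=
  let line := PySem.Str.strip raw
  if line = "" then []
  else if PySem.Str.isIn "," line
      && (decide ((40 : Int) < PySem.Str.len line) || decide (3 ≤ PySem.Str.count line ",")) then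
    (((PySem.Str.split? line ",").getD []).map PySem.Str.strip).filter (fun p => p != "")
  else [line]

theorem pvKey (raw : String) (h : '\n' ∉ raw.toList) :
    split_address_line_for_display_go 1 (some raw) = pvEmit raw := by
  have hnl : PySem.Str.isIn "\n" (PySem.Str.strip raw) = false := by
    rw [Bool.eq_false_iff]
    intro hc
    exact pvStrip_no_nl h ((pvIsIn_nl _).mp hc)
  rw [split_address_line_for_display_go, pvEmit]
  simp only [Option.getD_some, hnl, Bool.false_eq_true, if_false]
  rfl

theorem pvMain (s : Option String) :
    split_address_line_for_display_py s = split_address_line_for_display_py_alt s := by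
  rw [split_address_line_for_display_py, split_address_line_for_display_py_alt]
  rw [split_address_line_for_display_go]
  simp only []
  set t := PySem.Str.strip (s.getD "") with ht
  have htt : PySem.Str.strip t = t := by rw [ht]; exact pvStrip_idem _
  by_cases h0 : t = ""
  · rw [if_pos h0, pvSplit?_nl, h0]
    have h2 : PySem.Str.strip (String.ofList []) = "" := by
      apply String.toList_injective
      simp [PySem.Str.toList_strip, PySem.Chars.strip, PySem.Chars.lstrip, PySem.Chars.rstrip]
    rw [String.toList_empty, pvSplitCh]
    simp only [List.map_cons, List.map_nil, List.foldl_cons, List.foldl_nil, h2]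
    simp
  · rw [if_neg h0]
    by_cases hnl : '\n' ∈ t.toList
    · rw [if_pos ((pvIsIn_nl t).mpr hnl)]
      rw [pvSplit?_nl]
      apply PySem.List.foldl_congr_mem
      intro acc x hx
      simp only [List.mem_map] at hx
      obtain ⟨p, hp, rfl⟩ := hx
      have hnp : '\n' ∉ (String.ofList p).toList := by
        rw [String.toList_ofList]
        exact pvNot_mem_of_mem_splitCh hp
      rw [pvKey _ hnp, pvEmit]
      split_ifs <;> simp
    · rw [if_neg (fun hc => hnl ((pvIsIn_nl t).mp hc))]
      rw [pvSplit?_nl, pvSplitCh_of_not_mem hnl]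
      simp only [List.map_cons, List.map_nil, List.foldl_cons, List.foldl_nil,
        String.ofList_toList, htt]
      rw [if_neg h0]
      split_ifs <;> simp

-- ===== VERDICT (by name: the statement is the Claim_ definition above) =====
theorem split_address_line_for_display_py_spec : Claim_equal_split_address_line_for_display_py := by
  intro s _
  unfold Spec_split_address_line_for_display_py
  exact pvMain s
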